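-- pv_equiv track=rewrite | github.com/remowxdx/AoC-2021 | aoc03.py | rates
-- ===== SOURCE A (Python) =====
-- def most_common(lines):
--     most_commons = [0] * len(lines[0])
--     one_counts = [0] * len(lines[0])
--     for line in lines:
--         for i, digit in enumerate(line):
--             if digit == '1':
--                 one_counts[i] += 1
--
--     for i, count in enumerate(one_counts):
--         if count > len(lines) / 2:
--             most_commons[i] = 1
--     return most_commons
--
-- def rates(lines):
--     gamma_rate = most_common(lines)
--
--     epsilon_rate = [0] * len(lines[0])
--     for i, most_comm in enumerate(gamma_rate):
--         epsilon_rate[i] = 1 - most_comm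
--
--     gr = 0
--     for digit in gamma_rate:
--         gr = gr * 2 + digit
--
--     er = 0
--     for digit in epsilon_rate:
--         er = er * 2 + digit
--
--     return gr, er
-- ===== SOURCE B (Python) =====
-- def rates(lines):
--     n = len(lines)
--     med = n - n // 2 - 1
--     width = len(lines[0])
--     gamma = 0
--     for i in range(width):
--         column = sorted(line[i:i+1] == '1' for line in lines)
--         gamma = gamma * 2 + column[med]
--     return gamma, (1 << width) - 1 - gamma
-- ===== Notes on version B (the rewrite author's own statement) =====
-- stated objective: alternative
-- what changed: B replaces A's count-array-plus-threshold machinery by order statistics: each column (read as booleans via one-character slices) is sorted and the majority bit is the element at the median position n - n//2 - 1, accumulated directly into an integer gamma, with epsilon obtained by the closed form (1<<width)-1-gamma instead of complementing a bit list and re-converting.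
import Mathlib
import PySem

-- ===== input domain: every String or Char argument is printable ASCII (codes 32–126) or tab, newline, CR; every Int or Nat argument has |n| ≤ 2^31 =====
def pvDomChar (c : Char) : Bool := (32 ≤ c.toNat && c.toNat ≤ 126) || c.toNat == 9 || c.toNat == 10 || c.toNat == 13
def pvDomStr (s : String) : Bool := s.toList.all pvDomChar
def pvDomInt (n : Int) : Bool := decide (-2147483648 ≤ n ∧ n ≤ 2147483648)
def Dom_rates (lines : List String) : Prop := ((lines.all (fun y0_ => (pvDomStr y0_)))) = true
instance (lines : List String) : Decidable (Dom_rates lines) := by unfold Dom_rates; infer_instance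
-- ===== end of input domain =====

-- B finds each column's majority bit by an order statistic — sort the column (read as booleans via
-- one-character slices) and take the element at the median position n - n//2 - 1 — accumulating gamma
-- directly as an integer and taking epsilon by the closed form (1<<width)-1-gamma (objective: alternative).

-- ===== PORT A =====
-- inner loop of most_common: `for i, digit in enumerate(line): if digit == '1': one_counts[i] += 1`
-- (List.set is used for the item assignment; Pre_rates keeps every index in range, as Python requires)
def pvCountLine (cnt : List Int) (cs : List Char) (i : Nat) : List Int :=
  match cs with
  | [] => cnt
  | c :: rest => pvCountLine (if c == '1' then cnt.set i (cnt.getD i 0 + 1) else cnt) rest (i + 1)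

def most_common (lines : List String) : List Int :=
  -- len(lines[0]) raises IndexError on []; Pre_rates excludes it (headD is only a totalizer)
  let w := (lines.headD "").toList.length
  let one_counts := lines.foldl (fun cnt line => pvCountLine cnt line.toList 0) (List.replicate w (0 : Int))
  -- `count > len(lines)/2` uses float division; counts and length are far below 2^53, so it is exactly 2*count > n
  (one_counts.zipIdx).foldl
    (fun mc ci => if 2 * ci.1 > (lines.length : Int) then mc.set ci.2 1 else mc)
    (List.replicate w (0 : Int))

def rates (lines : List String) : Int × Int :=
  let gamma_rate := most_common lines
  let w := (lines.headD "").toList.length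
  let epsilon_rate := (gamma_rate.zipIdx).foldl (fun e mi => e.set mi.2 (1 - mi.1)) (List.replicate w (0 : Int))
  let gr := gamma_rate.foldl (fun g d => g * 2 + d) 0
  let er := epsilon_rate.foldl (fun g d => g * 2 + d) 0
  (gr, er)

-- ===== PORT B =====
-- `sorted(line[i:i+1] == '1' for line in lines)` (Python sorts False before True)
def pvColumn (lines : List String) (i : Nat) : List Bool :=
  PySem.List.sorted
    (lines.map (fun line => decide (PySem.Str.slice line (some (i : Int)) (some ((i : Int) + 1)) = "1")))
    (fun b => b) false

def rates_alt (lines : List String) : Int × Int :=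
  let n := lines.length
  let med := n - n / 2 - 1                       -- n - n // 2 - 1 (n ≥ 1 under Pre_rates)
  let width := (lines.headD "").toList.length    -- len(lines[0]); raises on [] like A, outside Pre_rates
  let gamma := (List.range width).foldl
    (fun g i => g * 2 + (if (pvColumn lines i).getD med false then 1 else 0)) 0
  (gamma, 2 ^ width - 1 - gamma)

-- ===== PRECONDITION & SPEC =====
-- Pre_ excludes exactly the inputs where A raises IndexError: the empty list (lines[0]) and
-- lists where some line has a '1' at a position ≥ len(lines[0]) (one_counts[i] += 1 out of range).
def Pre_rates (lines : List String) : Prop :=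
  lines ≠ [] ∧ ∀ l ∈ lines, '1' ∉ l.toList.drop (lines.headD "").toList.length
instance (lines : List String) : Decidable (Pre_rates lines) := by unfold Pre_rates; infer_instance

def pvWitness_rates : List String := ["10", "01", "11"]

def Spec_rates (lines : List String) (out : Int × Int) : Prop := out = rates_alt lines
instance (lines : List String) (out : Int × Int) : Decidable (Spec_rates lines out) := by unfold Spec_rates; infer_instance

-- ===== CLAIM (what is proved, stated in full; the proofs are below) =====
def Claim_equal_rates : Prop := ∀ (lines : List String), Dom_rates lines → Pre_rates lines → Spec_rates lines (rates lines)

-- ===== LEMMAS AND PROOFS =====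

-- the 0/1 indicator "line has a '1' at column j" used to characterise A's count array
def pvInd (j : Nat) (l : String) : Int :=
  if j < l.toList.length ∧ l.toList.getD j ' ' = '1' then 1 else 0

theorem pvCountLine_length (cs : List Char) (cnt : List Int) (i : Nat) :
    (pvCountLine cnt cs i).length = cnt.length := by
  induction cs generalizing cnt i with
  | nil => rfl
  | cons c rest ih =>
      simp only [pvCountLine]
      rw [ih]
      split <;> simp

theorem pvCountLine_getD (cs : List Char) (cnt : List Int) (i j : Nat)
    (h : ∀ m, m < cs.length → cs.getD m ' ' = '1' → i + m < cnt.length) :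
    (pvCountLine cnt cs i).getD j 0 =
      cnt.getD j 0 + (if i ≤ j ∧ j - i < cs.length ∧ cs.getD (j - i) ' ' = '1' then 1 else 0) := by
  induction cs generalizing cnt i with
  | nil => simp [pvCountLine]
  | cons c rest ih =>
      simp only [pvCountLine]
      rw [ih]
      · by_cases hji : j = i
        · subst hji
          by_cases hc : c = '1'
          · have hlt : j < cnt.length := by
              have := h 0 (by simp) (by simp [hc])
              omega
            simp [hc, List.getD, hlt]
          · simp [hc, List.getD]
        · by_cases hij : i ≤ j
          · have h1 : i + 1 ≤ j := by omega
            have hd : (if c == '1' then cnt.set i (cnt.getD i 0 + 1) else cnt).getD j 0 = cnt.getD j 0 := by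
              split
              · simp [List.getD, Ne.symm hji]
              · rfl
            rw [hd]
            have hg : (c :: rest).getD (j - i) ' ' = rest.getD (j - (i + 1)) ' ' := by
              have : j - i = (j - (i + 1)) + 1 := by omega
              rw [this]; rfl
            simp only [hg, List.length_cons]
            have hiff : (i ≤ j ∧ j - i < rest.length + 1 ∧ rest.getD (j - (i + 1)) ' ' = '1') ↔
                (i + 1 ≤ j ∧ j - (i + 1) < rest.length ∧ rest.getD (j - (i + 1)) ' ' = '1') := by
              constructor <;> rintro ⟨u, v, w⟩ <;> exact ⟨by omega, by omega, w⟩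
            simp only [hiff]
          · have hd : (if c == '1' then cnt.set i (cnt.getD i 0 + 1) else cnt).getD j 0 = cnt.getD j 0 := by
              split
              · simp [List.getD, Ne.symm hji]
              · rfl
            rw [hd]
            simp only [List.length_cons]
            have hiff : (i ≤ j ∧ j - i < rest.length + 1 ∧ (c :: rest).getD (j - i) ' ' = '1') ↔
                (i + 1 ≤ j ∧ j - (i + 1) < rest.length ∧ rest.getD (j - (i + 1)) ' ' = '1') := by
              constructor <;> rintro ⟨u, v, w⟩ <;> exact absurd u (by omega)
            simp only [hiff]
      · intro m hm h1
        have := h (m + 1) (by simpa using hm) (by simpa using h1)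
        have hl : (if c == '1' then cnt.set i (cnt.getD i 0 + 1) else cnt).length = cnt.length := by
          split <;> simp
        omega

theorem oneCounts_length (lines : List String) (cnt : List Int) :
    (lines.foldl (fun cnt line => pvCountLine cnt line.toList 0) cnt).length = cnt.length := by
  induction lines generalizing cnt with
  | nil => rfl
  | cons l rest ih => simp only [List.foldl_cons]; rw [ih, pvCountLine_length]

theorem oneCounts_getD (lines : List String) (cnt : List Int) (j : Nat)
    (h : ∀ l ∈ lines, ∀ m, m < l.toList.length → l.toList.getD m ' ' = '1' → m < cnt.length) :
    (lines.foldl (fun cnt line => pvCountLine cnt line.toList 0) cnt).getD j 0 =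
      cnt.getD j 0 + (lines.map (pvInd j)).sum := by
  induction lines generalizing cnt with
  | nil => simp
  | cons l rest ih =>
      simp only [List.foldl_cons, List.map_cons, List.sum_cons]
      rw [ih]
      · rw [pvCountLine_getD l.toList cnt 0 j (by intro m hm h1; simpa using h l (by simp) m hm h1)]
        simp only [pvInd, Nat.sub_zero, Nat.zero_le, true_and]
        ring
      · intro x hx m hm h1
        rw [pvCountLine_length]
        exact h x (by simp [hx]) m hm h1

-- the conditional-set loop of most_common, characterised pointwise
theorem condSet_getD (src : List Int) (k : Nat) (init : List Int) (P : Int → Prop) [DecidablePred P]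
    (j : Nat) (h : k + src.length ≤ init.length) :
    ((src.zipIdx k).foldl (fun mc ci => if P ci.1 then mc.set ci.2 1 else mc) init).getD j 0 =
      if k ≤ j ∧ j - k < src.length ∧ P (src.getD (j - k) 0) then 1 else init.getD j 0 := by
  induction src generalizing k init with
  | nil => simp
  | cons x rest ih =>
      simp only [List.zipIdx_cons, List.foldl_cons]
      have hlen1 : (if P x then init.set k 1 else init).length = init.length := by split <;> simp
      rw [ih (k + 1) _ (by rw [hlen1]; simp at h ⊢; omega)]
      by_cases hjk : j = k
      · subst hjk
        have hlt : j < init.length := by simp at h; omega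
        by_cases hp : P x <;> simp [hp, List.getD, hlt]
      · by_cases hkj : k ≤ j
        · have h1 : k + 1 ≤ j := by omega
          have hset : (if P x then init.set k 1 else init).getD j 0 = init.getD j 0 := by
            split
            · simp [List.getD, Ne.symm hjk]
            · rfl
          rw [hset]
          have hidx : (x :: rest).getD (j - k) 0 = rest.getD (j - (k + 1)) 0 := by
            have : j - k = (j - (k + 1)) + 1 := by omega
            rw [this]; rfl
          rw [hidx]
          simp only [List.length_cons]
          have hiff : (k ≤ j ∧ j - k < rest.length + 1 ∧ P (rest.getD (j - (k + 1)) 0)) ↔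
              (k + 1 ≤ j ∧ j - (k + 1) < rest.length ∧ P (rest.getD (j - (k + 1)) 0)) := by
            constructor <;> rintro ⟨u, v, w⟩ <;> exact ⟨by omega, by omega, w⟩
          simp only [hiff]
        · have hset : (if P x then init.set k 1 else init).getD j 0 = init.getD j 0 := by
            split
            · simp [List.getD, Ne.symm hjk]
            · rfl
          rw [hset]
          have hiff : (k ≤ j ∧ j - k < rest.length + 1 ∧ P ((x :: rest).getD (j - k) 0)) ↔
              (k + 1 ≤ j ∧ j - (k + 1) < rest.length ∧ P (rest.getD (j - (k + 1)) 0)) := by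
            constructor <;> rintro ⟨u, v, w⟩ <;> exact absurd u (by omega)
          simp only [List.length_cons, hiff]

theorem condSet_length (src : List Int) (k : Nat) (init : List Int) (P : Int → Prop) [DecidablePred P] :
    ((src.zipIdx k).foldl (fun mc ci => if P ci.1 then mc.set ci.2 1 else mc) init).length = init.length := by
  induction src generalizing k init with
  | nil => rfl
  | cons x rest ih =>
      simp only [List.zipIdx_cons, List.foldl_cons]
      rw [ih]
      split <;> simp

-- the unconditional-set loop of epsilon_rate, characterised pointwise
theorem mapSet_getD (src : List Int) (k : Nat) (init : List Int) (f : Int → Int) (j : Nat)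
    (h : k + src.length ≤ init.length) :
    ((src.zipIdx k).foldl (fun e mi => e.set mi.2 (f mi.1)) init).getD j 0 =
      if k ≤ j ∧ j - k < src.length then f (src.getD (j - k) 0) else init.getD j 0 := by
  induction src generalizing k init with
  | nil => simp
  | cons x rest ih =>
      simp only [List.zipIdx_cons, List.foldl_cons]
      rw [ih (k + 1) _ (by simp at h ⊢; omega)]
      by_cases hjk : j = k
      · subst hjk
        have hlt : j < init.length := by simp at h; omega
        simp [List.getD, hlt]
      · by_cases hkj : k ≤ j
        · have h1 : k + 1 ≤ j := by omega
          have hset : (init.set k (f x)).getD j 0 = init.getD j 0 := by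
            simp [List.getD, Ne.symm hjk]
          rw [hset]
          have hidx : (x :: rest).getD (j - k) 0 = rest.getD (j - (k + 1)) 0 := by
            have : j - k = (j - (k + 1)) + 1 := by omega
            rw [this]; rfl
          rw [hidx]
          simp only [List.length_cons]
          have hiff : (k ≤ j ∧ j - k < rest.length + 1) ↔ (k + 1 ≤ j ∧ j - (k + 1) < rest.length) := by
            constructor <;> rintro ⟨u, v⟩ <;> exact ⟨by omega, by omega⟩
          simp only [hiff]
        · have hset : (init.set k (f x)).getD j 0 = init.getD j 0 := by
            simp [List.getD, Ne.symm hjk]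
          rw [hset]
          have hc1 : ¬ (k ≤ j ∧ j - k < rest.length + 1) := fun u => absurd u.1 hkj
          have hc2 : ¬ (k + 1 ≤ j ∧ j - (k + 1) < rest.length) := fun u => absurd u.1 (by omega)
          simp only [List.length_cons, if_neg hc1, if_neg hc2]

theorem mapSet_length (src : List Int) (k : Nat) (init : List Int) (f : Int → Int) :
    ((src.zipIdx k).foldl (fun e mi => e.set mi.2 (f mi.1)) init).length = init.length := by
  induction src generalizing k init with
  | nil => rfl
  | cons x rest ih =>
      simp only [List.zipIdx_cons, List.foldl_cons]
      rw [ih]; simp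

-- gamma's fold plus the fold over the complemented bits is a constant
theorem fold_bits_compl (bits : List Int) (a b : Int) :
    bits.foldl (fun g d => g * 2 + d) a + (bits.map (fun d => 1 - d)).foldl (fun g d => g * 2 + d) b =
      (a + b + 1) * 2 ^ bits.length - 1 := by
  induction bits generalizing a b with
  | nil => simp
  | cons d rest ih =>
      simp only [List.map_cons, List.foldl_cons, List.length_cons]
      rw [ih]
      ring

theorem most_common_eq (lines : List String) (hpre : Pre_rates lines) :
    most_common lines =
      (List.range (lines.headD "").toList.length).map
        (fun i => if 2 * ((lines.countP (fun l => i < l.toList.length ∧ l.toList.getD i ' ' = '1') : Nat) : Int) > (lines.length : Int) then (1 : Int) else 0) := by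
  obtain ⟨hne, hpre2⟩ := hpre
  unfold most_common
  dsimp only
  set w := (lines.headD "").toList.length with hw
  have hlen : ∀ l ∈ lines, ∀ m, m < l.toList.length → l.toList.getD m ' ' = '1' → m < w := by
    intro l hl m hm h1
    by_contra hge
    have hm' : m - w < (l.toList.drop w).length := by rw [List.length_drop]; omega
    have hmem : l.toList.getD m ' ' ∈ l.toList.drop w := by
      rw [List.getD_eq_getElem _ _ hm]
      have he : l.toList[m] = (l.toList.drop w)[m - w]'hm' := by
        rw [List.getElem_drop]
        congr 1
        omega
      rw [he]
      exact List.getElem_mem hm'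
    exact hpre2 l hl (h1 ▸ hmem)
  set oc := lines.foldl (fun cnt line => pvCountLine cnt line.toList 0) (List.replicate w (0 : Int)) with hoc
  have hoclen : oc.length = w := by rw [hoc, oneCounts_length]; simp
  have hocget : ∀ j, oc.getD j 0 = (lines.map (pvInd j)).sum := by
    intro j
    rw [hoc, oneCounts_getD]
    · simp
    · intro l hl m hm h1; simpa using hlen l hl m hm h1
  have hsum : ∀ j, (lines.map (pvInd j)).sum = ((lines.countP (fun l => j < l.toList.length ∧ l.toList.getD j ' ' = '1') : Nat) : Int) := by
    intro j
    unfold pvInd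
    rw [← PySem.List.sum_map_ite_one_zero]
    congr 1
    apply List.map_congr_left
    intro l _
    simp
  apply List.ext_getElem
  · rw [condSet_length (P := fun c => 2 * c > (lines.length : Int))]
    simp
  · intro j hj hj2
    have hjw : j < w := by simpa using hj2
    rw [← List.getD_eq_getElem _ 0 hj]
    rw [condSet_getD oc 0 _ (fun c => 2 * c > (lines.length : Int)) j (by simp [hoclen])]
    simp only [Nat.sub_zero, Nat.zero_le, true_and, hoclen, hjw, true_and, hocget, hsum]
    simp

-- B's column characterised: the booleans it sorts are exactly A's per-column indicators
theorem take_one_drop_eq (xs : List Char) (i : Nat) :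
    (xs.drop i).take 1 = ['1'] ↔ (i < xs.length ∧ xs.getD i ' ' = '1') := by
  rcases h : xs.drop i with _ | ⟨c, rest⟩
  · constructor
    · intro hh; simp at hh
    · rintro ⟨h1, _⟩
      have := congrArg List.length h
      simp at this
      omega
  · have hi : i < xs.length := by
      by_contra hb
      rw [List.drop_eq_nil_of_le (by omega)] at h
      cases h
    have hc : xs[i] = c := by
      have h2 := congrArg (fun l => l.getD 0 ' ') h
      simp only [List.getD, List.getElem?_drop, Nat.add_zero, List.getElem?_eq_getElem hi,
        Option.getD_some] at h2
      exact h2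
    simp [List.getD, hi, hc]

theorem slice_one_eq (line : String) (i : Nat) :
    (PySem.Str.slice line (some (i : Int)) (some ((i : Int) + 1)) = "1") ↔
      (i < line.toList.length ∧ line.toList.getD i ' ' = '1') := by
  have hlist : (PySem.Str.slice line (some (i : Int)) (some ((i : Int) + 1))).toList
      = (line.toList.drop i).take 1 := by
    simp [PySem.Str.slice]
    exact_mod_cast PySem.List.slice_natCast_add line.toList i 1
  have hs : (PySem.Str.slice line (some (i : Int)) (some ((i : Int) + 1)) = "1") ↔
      (line.toList.drop i).take 1 = ['1'] := by
    constructor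
    · intro h; rw [← hlist, h]; rfl
    · intro h; exact String.toList_injective (by rw [hlist, h]; rfl)
  rw [hs]
  exact take_one_drop_eq line.toList i

-- sorting a boolean list groups the Falses before the Trues
theorem sorted_bool (bs : List Bool) :
    PySem.List.sorted bs (fun b => b) false =
      List.replicate (bs.count false) false ++ List.replicate (bs.count true) true := by
  apply PySem.List.sorted_id_eq_of_perm_of_pairwise
  · rw [List.perm_iff_count]
    intro a; cases a <;> simp [List.count_append, List.count_replicate]
  · rw [List.pairwise_append]
    refine ⟨List.pairwise_replicate.2 ?_, List.pairwise_replicate.2 ?_, ?_⟩ <;> simp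

theorem replicate_append_getD (f t med : Nat) (h : med < f + t) :
    (List.replicate f false ++ List.replicate t true).getD med false = decide (f ≤ med) := by
  by_cases hm : med < f
  · rw [List.getD_eq_getElem _ _ (by simp; omega), List.getElem_append_left (by simpa)]
    simp [hm]
  · rw [List.getD_eq_getElem _ _ (by simp; omega), List.getElem_append_right (by simp; omega)]
    simp; omega

-- B's median bit is exactly A's majority test 2*ones > n
theorem column_bit_eq (lines : List String) (i : Nat) (hne : lines ≠ []) :
    (if (pvColumn lines i).getD (lines.length - lines.length / 2 - 1) false then (1 : Int) else 0) =
      (if 2 * ((lines.countP (fun l => i < l.toList.length ∧ l.toList.getD i ' ' = '1') : Nat) : Int) > (lines.length : Int) then 1 else 0) := by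
  set p : String → Prop := fun l => i < l.toList.length ∧ l.toList.getD i ' ' = '1' with hp
  set bs : List Bool := lines.map (fun line => decide (PySem.Str.slice line (some (i : Int)) (some ((i : Int) + 1)) = "1")) with hbs
  have hbseq : bs = lines.map (fun l => decide (p l)) := by
    rw [hbs]
    apply List.map_congr_left
    intro l _
    simp only [decide_eq_decide]
    exact slice_one_eq l i
  have hn : bs.length = lines.length := by rw [hbs]; simp
  have ht : bs.count true = lines.countP (fun l => decide (p l)) := by
    rw [hbseq, List.count_eq_countP, List.countP_map]
    apply List.countP_congr
    intro l _
    simp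
  have hft : bs.count false + bs.count true = lines.length := by
    rw [List.count_false_add_count_true, hn]
  have hmed : lines.length - lines.length / 2 - 1 < bs.count false + bs.count true := by
    rw [hft]
    have : 0 < lines.length := List.length_pos_iff.2 hne
    omega
  unfold pvColumn
  rw [← hbs, sorted_bool, replicate_append_getD _ _ _ hmed]
  have key : (bs.count false ≤ lines.length - lines.length / 2 - 1) ↔
      (2 * ((lines.countP (fun l => decide (p l)) : Nat) : Int) > (lines.length : Int)) := by
    rw [← ht]
    have h0 : 0 < lines.length := List.length_pos_iff.2 hne
    constructor <;> intro h <;> [push_cast; skip] <;> omega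
  by_cases hcase : bs.count false ≤ lines.length - lines.length / 2 - 1
  · rw [if_pos (by simpa using hcase), if_pos (key.1 hcase)]
  · rw [if_neg (by simpa using hcase), if_neg (fun hk => hcase (key.2 hk))]

theorem rates_eq (lines : List String) (hpre : Pre_rates lines) :
    rates lines = rates_alt lines := by
  have hmc := most_common_eq lines hpre
  unfold rates rates_alt
  dsimp only
  set w := (lines.headD "").toList.length with hw
  set bit : Nat → Int := fun i => if 2 * ((lines.countP (fun l => i < l.toList.length ∧ l.toList.getD i ' ' = '1') : Nat) : Int) > (lines.length : Int) then (1 : Int) else 0 with hbit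
  have hg : most_common lines = (List.range w).map bit := hmc
  rw [hg]
  have hglen : ((List.range w).map bit).length = w := by simp
  -- the epsilon loop is an index-wise map of (1 - ·)
  have heps : (((List.range w).map bit).zipIdx).foldl (fun e mi => e.set mi.2 (1 - mi.1)) (List.replicate w (0 : Int)) =
      ((List.range w).map bit).map (fun d => 1 - d) := by
    apply List.ext_getElem
    · rw [mapSet_length]; simp
    · intro j hj hj2
      have hjw : j < w := by simpa using hj2
      rw [← List.getD_eq_getElem _ 0 hj]
      rw [mapSet_getD _ 0 _ _ j (by simp)]
      simp [hjw]
  rw [heps]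
  -- gamma: fold over the bit list = fold over the column indices; the per-column bits agree
  have hgr : ((List.range w).map bit).foldl (fun g d => g * 2 + d) 0 =
      (List.range w).foldl
        (fun g i => g * 2 + (if (pvColumn lines i).getD (lines.length - lines.length / 2 - 1) false then 1 else 0)) 0 := by
    rw [List.foldl_map]
    congr 1
    funext a x
    simp only [hbit]
    exact (congrArg (fun z => a * 2 + z) (column_bit_eq lines x hpre.1)).symm
  -- epsilon: fold over complemented bits = 2^w - 1 - gamma
  have her : (((List.range w).map bit).map (fun d => 1 - d)).foldl (fun g d => g * 2 + d) 0 =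
      2 ^ w - 1 - ((List.range w).map bit).foldl (fun g d => g * 2 + d) 0 := by
    have := fold_bits_compl ((List.range w).map bit) 0 0
    simp only [hglen] at this
    omega
  rw [her, hgr]

-- ===== VERDICT (by name: the statement is the Claim_ definition above) =====
theorem rates_spec : Claim_equal_rates := by
  intro lines _ hpre
  unfold Spec_rates
  exact rates_eq lines hpre
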